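-- pv_equiv track=rewrite | github.com/maxpoletaev/pypograph | pypograph/rules.py | process
-- ===== SOURCE A (Python) =====
-- def process(text):
--     new_text = []
--     old_text = text.split(' ')
--     text_length = len(old_text)
--
--     for i, word in enumerate(old_text):
--         space = ''
--         if i < text_length - 1:
--             space = '&nbsp;' if len(word) < 3 and word.strip() else ' '
--
--         new_text.append(word + space)
--     return ''.join(new_text)
-- ===== SOURCE B (Python) =====
-- def process(text):
--     out = []
--     token = []
--     for ch in text:
--         if ch == ' ':
--             out += token
--             if 1 <= len(token) <= 2 and any(not c.isspace() for c in token):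
--                 out.append('&nbsp;')
--             else:
--                 out.append(' ')
--             token = []
--         else:
--             token.append(ch)
--     out += token
--     return ''.join(out)
-- ===== Notes on version B (the rewrite author's own statement) =====
-- stated objective: alternative
-- what changed: B replaces A's split/enumerate/join pipeline with a single character-by-character scan that flushes a token buffer at each space and decides the separator there, never materializing the word list.
import Mathlib
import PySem

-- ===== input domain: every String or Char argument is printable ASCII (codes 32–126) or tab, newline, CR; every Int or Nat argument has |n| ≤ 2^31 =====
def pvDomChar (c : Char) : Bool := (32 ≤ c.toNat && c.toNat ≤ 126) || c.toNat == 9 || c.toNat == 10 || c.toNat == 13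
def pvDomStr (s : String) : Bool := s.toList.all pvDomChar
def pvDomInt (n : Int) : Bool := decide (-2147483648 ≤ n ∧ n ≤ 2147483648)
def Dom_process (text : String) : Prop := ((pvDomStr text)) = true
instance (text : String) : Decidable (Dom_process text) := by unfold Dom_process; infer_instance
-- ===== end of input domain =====

-- B is a single char-scan with a token buffer instead of A's split/enumerate/join pipeline (objective: alternative).

-- ===== PORT A =====
-- A: split on ' ', append to each non-last word '&nbsp;' if it is short (<3) and strips non-empty, else ' ', join.
def process (text : String) : String :=
  let old_text := PySem.Chars.splitOn text.toList [' ']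
  let text_length := old_text.length
  let new_text := (PySem.List.enumerate old_text).foldl
    (fun acc iw =>
      let space : List Char :=
        if iw.1 < (text_length : Int) - 1 then
          (if iw.2.length < 3 ∧ PySem.Chars.strip iw.2 ≠ [] then "&nbsp;".toList else [' '])
        else []
      acc ++ [iw.2 ++ space]) []
  String.ofList (PySem.Chars.join [] new_text)

-- ===== PORT B =====
-- B: one pass over the characters; at a space, flush the token buffer plus the chosen separator.
def pvStepB (st : List Char × List Char) (c : Char) : List Char × List Char :=
  if c = ' ' then
    (st.1 ++ st.2 ++
      (if 1 ≤ st.2.length ∧ st.2.length ≤ 2 ∧ st.2.any (fun ch => !(PySem.Chars.isspace ch)) then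
        "&nbsp;".toList else [' ']), [])
  else (st.1, st.2 ++ [c])

def process_alt (text : String) : String :=
  let st := text.toList.foldl pvStepB ([], [])
  String.ofList (st.1 ++ st.2)

-- ===== PRECONDITION & SPEC =====
def Spec_process (text : String) (out : String) : Prop := out = process_alt text
instance (text : String) (out : String) : Decidable (Spec_process text out) := by unfold Spec_process; infer_instance

-- ===== CLAIM (what is proved, stated in full; the proofs are below) =====
def Claim_equal_process : Prop := ∀ (text : String), Dom_process text → Spec_process text (process text)

-- ===== LEMMAS AND PROOFS =====

-- the word list of split(' '), token accumulator kept in order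
def pvSplitW : List Char → List Char → List (List Char)
  | [], cur => [cur]
  | c :: r, cur => if c = ' ' then cur :: pvSplitW r [] else pvSplitW r (cur ++ [c])

-- A's separator for a non-last word
def pvSepA (w : List Char) : List Char :=
  if w.length < 3 ∧ PySem.Chars.strip w ≠ [] then "&nbsp;".toList else [' ']

-- joining the word list with A's separators
def pvJoinW : List (List Char) → List Char
  | [] => []
  | [w] => w
  | w :: w' :: ws => w ++ pvSepA w ++ pvJoinW (w' :: ws)

theorem pvSplitW_ne_nil (l cur : List Char) : pvSplitW l cur ≠ [] := by
  induction l generalizing cur with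
  | nil => simp [pvSplitW]
  | cons c r ih => simp only [pvSplitW]; split <;> simp [ih]

theorem pv_go_spec (fuel : Nat) (l cur : List Char) (acc : List (List Char))
    (h : l.length < fuel) :
    PySem.Chars.splitOn.go [' '] fuel l cur acc = acc.reverse ++ pvSplitW l cur.reverse := by
  induction fuel generalizing l cur acc with
  | zero => omega
  | succ fuel ih =>
    cases l with
    | nil => simp [PySem.Chars.splitOn.go, pvSplitW]
    | cons c r =>
      rw [PySem.Chars.splitOn.go]
      by_cases hc : c = ' '
      · have hp : [' '].isPrefixOf (c :: r) = true := by simp [hc, List.isPrefixOf]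
        simp only [hp, if_pos]
        rw [ih _ _ _ (by simpa using Nat.lt_of_succ_lt_succ h)]
        simp [pvSplitW, hc]
      · have hp : [' '].isPrefixOf (c :: r) = false := by
          simp only [List.isPrefixOf, Bool.and_eq_false_iff, beq_eq_false_iff_ne, ne_eq]
          exact Or.inl (fun h => hc h.symm)
        simp only [hp]
        rw [if_neg (by simp)]
        rw [ih _ _ _ (by simpa using Nat.lt_of_succ_lt_succ h)]
        simp [pvSplitW, hc]

theorem pv_splitOn_eq (cs : List Char) : PySem.Chars.splitOn cs [' '] = pvSplitW cs [] := by
  unfold PySem.Chars.splitOn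
  rw [pv_go_spec _ _ _ _ (by omega)]
  simp

theorem pv_strip_eq_nil_iff (w : List Char) :
    PySem.Chars.strip w = [] ↔ ∀ c ∈ w, PySem.Chars.isspace c = true := by
  unfold PySem.Chars.strip PySem.Chars.rstrip PySem.Chars.lstrip
  simp only [List.reverse_eq_nil_iff, List.dropWhile_eq_nil_iff, List.mem_reverse]
  constructor
  · intro h c hc
    rcases List.mem_append.mp (by rw [List.takeWhile_append_dropWhile
        (p := PySem.Chars.isspace) (l := w)]; exact hc) with h1 | h1
    · exact List.mem_takeWhile_imp h1
    · exact h c h1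
  · intro h c hc
    exact h c ((List.dropWhile_sublist _).mem hc)

theorem pv_strip_ne_nil_iff (w : List Char) :
    PySem.Chars.strip w ≠ [] ↔ w.any (fun ch => !(PySem.Chars.isspace ch)) = true := by
  rw [Ne, pv_strip_eq_nil_iff, List.any_eq_true]
  simp

theorem pv_sep_eq (w : List Char) :
    (if 1 ≤ w.length ∧ w.length ≤ 2 ∧ w.any (fun ch => !(PySem.Chars.isspace ch)) then
      "&nbsp;".toList else [' ']) = pvSepA w := by
  unfold pvSepA
  by_cases h : w.any (fun ch => !(PySem.Chars.isspace ch)) = true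
  · have hw : w ≠ [] := by rintro rfl; simp at h
    have hlen : 1 ≤ w.length := List.length_pos_of_ne_nil hw
    have hs := (pv_strip_ne_nil_iff w).mpr h
    by_cases h2 : w.length ≤ 2
    · rw [if_pos ⟨hlen, h2, h⟩, if_pos ⟨by omega, hs⟩]
    · rw [if_neg (by tauto), if_neg (by intro hcontra; exact absurd hcontra.1 (by omega))]
  · have hs : ¬ PySem.Chars.strip w ≠ [] := by
      intro hne; exact h ((pv_strip_ne_nil_iff w).mp hne)
    rw [if_neg (by tauto), if_neg (by tauto)]

theorem pv_B_spec (cs : List Char) (out tok : List Char) :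
    (cs.foldl pvStepB (out, tok)).1 ++ (cs.foldl pvStepB (out, tok)).2
      = out ++ pvJoinW (pvSplitW cs tok) := by
  induction cs generalizing out tok with
  | nil => simp [pvSplitW, pvJoinW]
  | cons c r ih =>
    rw [List.foldl_cons]
    by_cases hc : c = ' '
    · subst hc
      have hstep : pvStepB (out, tok) ' ' =
          (out ++ tok ++
            (if 1 ≤ tok.length ∧ tok.length ≤ 2 ∧
                tok.any (fun ch => !(PySem.Chars.isspace ch)) then
              "&nbsp;".toList else [' ']), []) := by
        unfold pvStepB; rw [if_pos rfl]
      rw [hstep, ih]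
      have hne := pvSplitW_ne_nil r []
      obtain ⟨w, ws, hws⟩ := List.exists_cons_of_ne_nil hne
      have hsp : pvSplitW (' ' :: r) tok = tok :: pvSplitW r [] := by
        unfold pvSplitW; rw [if_pos rfl]; cases r <;> rfl
      rw [hsp, hws]
      simp only [pvJoinW]
      rw [pv_sep_eq]
      simp
    · have hstep : pvStepB (out, tok) c = (out, tok ++ [c]) := by
        unfold pvStepB; rw [if_neg hc]
      have hsp : pvSplitW (c :: r) tok = pvSplitW r (tok ++ [c]) := by
        unfold pvSplitW; rw [if_neg hc]; cases r <;> rfl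
      rw [hstep, ih, hsp]

theorem pv_A_join_map (ws : List (List Char)) (s n : Int) (hn : n = s + ws.length) :
    PySem.Chars.join []
      ((PySem.List.enumerate ws s).map
        (fun iw => iw.2 ++ (if iw.1 < n - 1 then pvSepA iw.2 else [])))
      = pvJoinW ws := by
  induction ws generalizing s with
  | nil => simp [PySem.List.enumerate_nil, PySem.Chars.join_nil, pvJoinW]
  | cons w ws ih =>
    cases ws with
    | nil =>
      have hc : ¬ (s < n - 1) := by
        simp only [List.length_cons, List.length_nil] at hn; omega
      simp [PySem.List.enumerate_cons, PySem.List.enumerate_nil,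
        PySem.Chars.join_singleton, pvJoinW, hc]
    | cons w' ws' =>
      have hc : s < n - 1 := by
        simp only [List.length_cons] at hn; push_cast at hn; omega
      have ihh := ih (s + 1) (by
        simp only [List.length_cons] at hn ⊢; push_cast at hn ⊢; omega)
      rw [PySem.List.enumerate_cons, List.map_cons] at ihh
      rw [PySem.List.enumerate_cons, List.map_cons, PySem.List.enumerate_cons,
        List.map_cons, PySem.Chars.join_cons_cons, if_pos hc, ihh]
      simp [pvJoinW]

theorem pv_A_join (ws : List (List Char)) (s n : Int) (hn : n = s + ws.length) :
    PySem.Chars.join []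
      ((PySem.List.enumerate ws s).foldl
        (fun acc iw =>
          acc ++ [iw.2 ++ (if iw.1 < n - 1 then pvSepA iw.2 else [])]) [])
      = pvJoinW ws := by
  rw [PySem.List.foldl_append_singleton_eq_map
    (fun iw : Int × List Char => iw.2 ++ (if iw.1 < n - 1 then pvSepA iw.2 else []))]
  simpa using pv_A_join_map ws s n hn

-- ===== VERDICT (by name: the statement is the Claim_ definition above) =====
theorem process_spec : Claim_equal_process := by
  intro text _
  show String.ofList (PySem.Chars.join []
      ((PySem.List.enumerate (PySem.Chars.splitOn text.toList [' ']) 0).foldl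
        (fun acc iw =>
          acc ++ [iw.2 ++ (if iw.1 < ((PySem.Chars.splitOn text.toList [' ']).length : Int) - 1
            then pvSepA iw.2 else [])]) []))
    = String.ofList ((text.toList.foldl pvStepB ([], [])).1 ++ (text.toList.foldl pvStepB ([], [])).2)
  rw [pv_splitOn_eq,
    pv_A_join (pvSplitW text.toList []) 0 ((pvSplitW text.toList []).length : Int) (by simp),
    pv_B_spec]
  simp
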